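-- pv_equiv track=rewrite | github.com/prashantprabhakar/competitive_programming | google_foo_bar/numbers_station_coded_messages.py | solution
-- ===== SOURCE A (Python) =====
-- def solution(arr, num):
--     for i in range(len(arr)):
--         sum = arr[i]
--         if(sum == num):
--             return [i, i]
--         for j in range(i+1, len(arr)):
--             sum += arr[j]
--             if(sum == num):
--                 return [i, j]
--
--     return [-1, -1]
-- ===== SOURCE B (Python) =====
-- def solution(arr, num):
--     # prefix sums: pref[k] = arr[0] + ... + arr[k-1]
--     pref = [0]
--     for x in arr:
--         pref.append(pref[-1] + x)
--     # map prefix value -> ascending list of positions k >= 1 with pref[k] == value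
--     idx = {}
--     for k, v in enumerate(pref):
--         if k:
--             idx.setdefault(v, []).append(k)
--     # for each start i ascending, binary-search the smallest k > i with pref[k] == pref[i] + num
--     for i, p in enumerate(pref[:-1]):
--         ks = idx.get(p + num)
--         if ks is not None:
--             lo, hi = 0, len(ks)
--             while lo < hi:
--                 mid = (lo + hi) // 2
--                 if ks[mid] <= i:
--                     lo = mid + 1
--                 else:
--                     hi = mid
--             if lo < len(ks):
--                 return [i, ks[lo] - 1]
--     return [-1, -1]
-- ===== Notes on version B (the rewrite author's own statement) =====
-- stated objective: faster
-- what changed: Replaced the O(n^2) nested re-summation with prefix sums plus a hash map from prefix value to its ascending positions, binary-searching the smallest matching end index for each start.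
import Mathlib
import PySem

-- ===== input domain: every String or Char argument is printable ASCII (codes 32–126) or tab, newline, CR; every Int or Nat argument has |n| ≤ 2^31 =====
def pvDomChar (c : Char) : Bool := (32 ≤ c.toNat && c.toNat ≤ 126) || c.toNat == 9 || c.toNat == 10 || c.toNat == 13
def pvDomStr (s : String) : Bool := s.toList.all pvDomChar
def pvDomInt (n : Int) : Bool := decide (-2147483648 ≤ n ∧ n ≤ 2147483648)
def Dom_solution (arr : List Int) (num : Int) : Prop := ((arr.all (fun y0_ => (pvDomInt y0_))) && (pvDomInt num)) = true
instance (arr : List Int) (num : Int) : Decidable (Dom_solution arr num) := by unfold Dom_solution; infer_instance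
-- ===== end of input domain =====

-- B replaces A's quadratic nested scan by prefix sums plus a hash map from prefix value to its
-- ascending positions, binary-searching the smallest end per start (objective: faster, O(n log n)).

-- ===== PORT A =====
-- inner loop: 'for j in range(i+1, len(arr)): sum += arr[j]; if sum == num: return [i, j]'
def aInner (arr : List Int) (num : Int) (i : Nat) (s : Int) (j : Nat) : Option (List Int) :=
  if h : j < arr.length then
    let s' := s + arr[j]
    if s' = num then some [(i : Int), (j : Int)] else aInner arr num i s' (j+1)
  else none
termination_by arr.length - j

-- outer loop: 'for i in range(len(arr)): sum = arr[i]; if sum == num: return [i, i]; <inner>'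
def aOuter (arr : List Int) (num : Int) (i : Nat) : List Int :=
  if h : i < arr.length then
    let s := arr[i]
    if s = num then [(i : Int), (i : Int)]
    else
      match aInner arr num i s (i+1) with
      | some r => r
      | none => aOuter arr num (i+1)
  else [-1, -1]
termination_by arr.length - i

def solution (arr : List Int) (num : Int) : List Int := aOuter arr num 0

-- ===== PORT B =====
-- 'pref = [0]; for x in arr: pref.append(pref[-1] + x)'
def bPref (arr : List Int) : List Int :=
  arr.foldl (fun pref x => pref ++ [pref.getLast! + x]) [0]

-- 'idx = {}; for k, v in enumerate(pref): if k: idx.setdefault(v, []).append(k)'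
def bIdx (pref : List Int) : PySem.Dict Int (List Nat) :=
  pref.zipIdx.foldl
    (fun d q => if q.2 ≠ 0 then d.insert q.1 ((d.getD q.1 []) ++ [q.2]) else d)
    PySem.Dict.empty

-- 'lo, hi = 0, len(ks); while lo < hi: mid = (lo+hi)//2; if ks[mid] <= i: lo = mid+1 else: hi = mid'
def bSearch (ks : List Nat) (i lo hi : Nat) : Nat :=
  if _h : lo < hi then
    let mid := (lo + hi) / 2
    if ks[mid]! ≤ i then bSearch ks i (mid+1) hi else bSearch ks i lo mid
  else lo
termination_by hi - lo
decreasing_by all_goals omega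

-- 'for i, p in enumerate(pref[:-1]): ks = idx.get(p + num); if ks is not None: <bsearch>;
--  if lo < len(ks): return [i, ks[lo] - 1]' ; falls through to 'return [-1, -1]'
def bMain (idx : PySem.Dict Int (List Nat)) (num : Int) : List (Int × Nat) → List Int
  | [] => [-1, -1]
  | (p, i) :: rest =>
    match idx.get? (p + num) with
    | none => bMain idx num rest
    | some ks =>
      let lo := bSearch ks i 0 ks.length
      if _h : lo < ks.length then [(i : Int), (ks[lo]! : Int) - 1]
      else bMain idx num rest

def solution_alt (arr : List Int) (num : Int) : List Int :=
  let pref := bPref arr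
  bMain (bIdx pref) num pref.dropLast.zipIdx

-- ===== PRECONDITION & SPEC =====
def Spec_solution (arr : List Int) (num : Int) (out : List Int) : Prop := out = solution_alt arr num
instance (arr : List Int) (num : Int) (out : List Int) : Decidable (Spec_solution arr num out) := by unfold Spec_solution; infer_instance

-- ===== CLAIM (what is proved, stated in full; the proofs are below) =====
def Claim_equal_solution : Prop := ∀ (arr : List Int) (num : Int), Dom_solution arr num → Spec_solution arr num (solution arr num)

-- ===== LEMMAS AND PROOFS =====

-- prefix sum of the first k elements
def pvP (arr : List Int) (k : Nat) : Int := (arr.take k).sum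

-- the common specification loop: first start index i with a matching end,
-- k ranges over i+1..n and stands for the end index + 1
def specLoop (arr : List Int) (num : Int) (i : Nat) : List Int :=
  if i < arr.length then
    match (List.range' (i+1) (arr.length - i)).find?
        (fun k => pvP arr k == pvP arr i + num) with
    | some k => [(i : Int), (k : Int) - 1]
    | none => specLoop arr num (i+1)
  else [-1, -1]
termination_by arr.length - i

theorem find?_eq_head?_filter {α : Type} (p : α → Bool) (l : List α) :
    l.find? p = (l.filter p).head? := by
  induction l with
  | nil => rfl
  | cons x xs ih =>
    cases h : p x with
    | true => rw [List.find?_cons_of_pos h, List.filter_cons_of_pos h, List.head?_cons]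
    | false => rw [List.find?_cons_of_neg (by simp [h]), List.filter_cons_of_neg (by simp [h]), ih]

-- ---- A ⇒ spec ----
theorem aInner_eq (arr : List Int) (num : Int) (i : Nat) :
    ∀ t, aInner arr num i (pvP arr t - pvP arr i) t =
      match (List.range' (t+1) (arr.length - t)).find?
          (fun k => pvP arr k == pvP arr i + num) with
      | some k => some [(i : Int), (k : Int) - 1]
      | none => none := by
  suffices H : ∀ d t, arr.length - t = d →
      aInner arr num i (pvP arr t - pvP arr i) t =
      match (List.range' (t+1) (arr.length - t)).find?
          (fun k => pvP arr k == pvP arr i + num) with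
      | some k => some [(i : Int), (k : Int) - 1]
      | none => none from fun t => H _ t rfl
  intro d
  induction d with
  | zero =>
    intro t ht
    have hle : ¬ t < arr.length := by omega
    rw [aInner, dif_neg hle, ht]
    simp
  | succ d ih =>
    intro t ht
    have hlt : t < arr.length := by omega
    rw [aInner, dif_pos hlt]
    have hs : pvP arr t - pvP arr i + arr[t] = pvP arr (t+1) - pvP arr i := by
      have h1 := List.sum_take_succ arr t hlt
      simp only [pvP, h1]; ring
    have hrange : List.range' (t+1) (arr.length - t) =
        (t+1) :: List.range' (t+2) (arr.length - (t+1)) := by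
      have h2 : arr.length - t = (arr.length - (t+1)) + 1 := by omega
      rw [h2, List.range'_succ]
    rw [hrange]
    by_cases hc : pvP arr t - pvP arr i + arr[t] = num
    · have hk : pvP arr (t+1) = pvP arr i + num := by omega
      simp only [hs] at hc ⊢
      rw [if_pos hc, List.find?_cons_of_pos (by simp [hk])]
      simp
    · have hk : ¬ (pvP arr (t+1) = pvP arr i + num) := by omega
      simp only [hs] at hc ⊢
      rw [if_neg hc, List.find?_cons_of_neg (by simp [hk])]
      exact ih (t+1) (by omega)

theorem aOuter_eq_specLoop (arr : List Int) (num : Int) :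
    ∀ i, aOuter arr num i = specLoop arr num i := by
  suffices H : ∀ d i, arr.length - i = d → aOuter arr num i = specLoop arr num i from
    fun i => H _ i rfl
  intro d
  induction d with
  | zero =>
    intro i hi
    have hle : ¬ i < arr.length := by omega
    rw [aOuter, dif_neg hle, specLoop, if_neg hle]
  | succ d ih =>
    intro i hi
    have hlt : i < arr.length := by omega
    rw [aOuter, dif_pos hlt, specLoop, if_pos hlt]
    have hrange : List.range' (i+1) (arr.length - i) =
        (i+1) :: List.range' (i+2) (arr.length - (i+1)) := by
      have h2 : arr.length - i = (arr.length - (i+1)) + 1 := by omega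
      rw [h2, List.range'_succ]
    have harr : arr[i] = pvP arr (i+1) - pvP arr i := by
      have h1 := List.sum_take_succ arr i hlt
      simp only [pvP, h1]; ring
    rw [hrange]
    by_cases hc : arr[i] = num
    · have hk : pvP arr (i+1) = pvP arr i + num := by omega
      rw [if_pos hc, List.find?_cons_of_pos (by simp [hk])]
      simp
    · have hk : ¬ (pvP arr (i+1) = pvP arr i + num) := by omega
      rw [if_neg hc, List.find?_cons_of_neg (by simp [hk])]
      have hinner := aInner_eq arr num i (i+1)
      have hs' : arr[i] = pvP arr (i+1) - pvP arr i := harr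
      rw [hs', hinner]
      cases (List.range' (i+1+1) (arr.length - (i+1))).find?
          (fun k => pvP arr k == pvP arr i + num) with
      | none => exact ih (i+1) (by omega)
      | some k => rfl

-- ---- B ⇒ spec ----
theorem getLast!_cons_cons (x y : Int) (l : List Int) :
    (x :: y :: l).getLast! = (y :: l).getLast! := by
  unfold List.getLast!
  simp only
  exact List.getLast_cons (by simp)

theorem concat_getLast! (l : List Int) (a : Int) : (l ++ [a]).getLast! = a := by
  induction l with
  | nil => rfl
  | cons x xs ih =>
    cases h : xs ++ [a] with
    | nil => simp at h
    | cons y t => rw [List.cons_append, h, getLast!_cons_cons, ← h, ih]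

theorem bPref_gen : ∀ (xs pre : List Int),
    xs.foldl (fun pref x => pref ++ [pref.getLast! + x])
      ((List.range (pre.length + 1)).map (fun k => (pre.take k).sum)) =
    (List.range ((pre ++ xs).length + 1)).map (fun k => ((pre ++ xs).take k).sum) := by
  intro xs
  induction xs with
  | nil => intro pre; simp
  | cons x xs ih =>
    intro pre
    rw [List.foldl_cons]
    have hacc : (List.range (pre.length + 1)).map (fun k => (pre.take k).sum)
        ++ [((List.range (pre.length + 1)).map (fun k => (pre.take k).sum)).getLast! + x]
        = (List.range ((pre ++ [x]).length + 1)).map (fun k => ((pre ++ [x]).take k).sum) := by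
      have hlast : ((List.range (pre.length + 1)).map (fun k => (pre.take k).sum)).getLast!
          = pre.sum := by
        rw [List.range_succ, List.map_append, List.map_singleton, concat_getLast!]
        simp
      rw [hlast]
      have hR : (List.range ((pre ++ [x]).length + 1)).map (fun k => ((pre ++ [x]).take k).sum)
          = (List.range (pre.length + 1)).map (fun k => (pre.take k).sum) ++ [pre.sum + x] := by
        have h2 : (pre ++ [x]).length + 1 = (pre.length + 1) + 1 := by simp
        rw [h2, List.range_succ, List.map_append]
        congr 1
        · apply List.map_congr_left
          intro k hk
          have hk' : k ≤ pre.length := by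
            have := List.mem_range.mp hk; omega
          rw [List.take_append_of_le_length hk']
        · simp
      rw [hR]
    rw [hacc, ih (pre ++ [x])]
    simp

theorem bPref_eq (arr : List Int) :
    bPref arr = (List.range (arr.length + 1)).map (pvP arr) := by
  have h := bPref_gen arr []
  simpa [bPref, pvP] using h

theorem idx_fold_get? :
    ∀ (ps : List (Int × Nat)) (d : PySem.Dict Int (List Nat)) (v : Int),
    (ps.foldl (fun d q => if q.2 ≠ 0 then d.insert q.1 ((d.getD q.1 []) ++ [q.2]) else d)
        d).get? v =
      (match d.get? v with
       | some l => some (l ++ (ps.filter (fun q => decide (q.2 ≠ 0) && (q.1 == v))).map (·.2))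
       | none =>
         if ((ps.filter (fun q => decide (q.2 ≠ 0) && (q.1 == v))).map (·.2)).isEmpty then none
         else some ((ps.filter (fun q => decide (q.2 ≠ 0) && (q.1 == v))).map (·.2))) := by
  intro ps
  induction ps with
  | nil => intro d v; cases h : d.get? v <;> simp [h]
  | cons q ps ih =>
    intro d v
    rw [List.foldl_cons]
    by_cases hz : q.2 ≠ 0
    · rw [if_pos hz]
      rw [ih]
      by_cases hv : q.1 = v
      · have hget : (d.insert q.1 ((d.getD q.1 []) ++ [q.2])).get? v
            = some ((d.getD q.1 []) ++ [q.2]) := by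
          rw [hv, PySem.Dict.get?_insert_self]
        rw [hget, List.filter_cons_of_pos (by simp [hz, hv])]
        cases hd : d.get? v with
        | some l =>
          have : d.getD q.1 [] = l := by rw [hv]; simp [PySem.Dict.getD_eq_get?_getD, hd]
          simp [this]
        | none =>
          have : d.getD q.1 [] = [] := by rw [hv]; simp [PySem.Dict.getD_eq_get?_getD, hd]
          simp [this]
      · have hne : v ≠ q.1 := fun h => hv h.symm
        have hget : (d.insert q.1 ((d.getD q.1 []) ++ [q.2])).get? v = d.get? v := by
          rw [PySem.Dict.get?_insert_of_ne _ _ hne]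
        rw [hget, List.filter_cons_of_neg (by simp [hv])]
    · rw [if_neg hz, ih, List.filter_cons_of_neg (by simp at hz; simp [hz])]

theorem zipIdx_map_range (m : Nat) (f : Nat → Int) :
    ((List.range m).map f).zipIdx = (List.range m).map (fun k => (f k, k)) := by
  induction m with
  | zero => rfl
  | succ m ih =>
    rw [List.range_succ, List.map_append, List.map_append, List.zipIdx_append, ih]
    simp

theorem bIdx_get? (arr : List Int) (v : Int) :
    (bIdx (bPref arr)).get? v =
      (let l := (List.range' 1 arr.length).filter (fun k => pvP arr k == v);
       if l.isEmpty then none else some l) := by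
  have hps : (bPref arr).zipIdx = (List.range (arr.length + 1)).map (fun k => (pvP arr k, k)) := by
    rw [bPref_eq, zipIdx_map_range]
  have hg : ((((List.range (arr.length + 1)).map (fun k => (pvP arr k, k))).filter
        (fun q => decide (q.2 ≠ 0) && (q.1 == v))).map (fun q => q.2))
      = (List.range' 1 arr.length).filter (fun k => pvP arr k == v) := by
    rw [List.filter_map, List.map_map]
    have hrange : List.range (arr.length + 1) = 0 :: List.range' 1 arr.length := by
      rw [List.range_eq_range', List.range'_succ]
    rw [hrange]
    rw [List.filter_cons_of_neg (by simp)]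
    have : ∀ k ∈ List.range' 1 arr.length,
        ((fun q => decide (q.2 ≠ 0) && (q.1 == v)) ∘ (fun k => (pvP arr k, k))) k
          = (pvP arr k == v) := by
      intro k hk
      have : 1 ≤ k := (List.mem_range'_1.mp hk).1
      simp [Function.comp]
      omega
    rw [List.filter_congr this]
    exact List.map_id _
  have h := idx_fold_get? ((bPref arr).zipIdx) PySem.Dict.empty v
  rw [hps] at h
  unfold bIdx
  rw [hps, h, PySem.Dict.get?_empty, hg]

theorem bSearch_spec (ks : List Nat) (i : Nat)
    (hsort : ∀ m m' : Nat, m ≤ m' → m' < ks.length → ks[m]! ≤ ks[m']!) :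
    ∀ lo hi, lo ≤ hi → hi ≤ ks.length →
    (∀ m, m < lo → ks[m]! ≤ i) →
    (∀ m, hi ≤ m → m < ks.length → i < ks[m]!) →
    (bSearch ks i lo hi ≤ ks.length ∧
     (∀ m, m < bSearch ks i lo hi → ks[m]! ≤ i) ∧
     (∀ m, bSearch ks i lo hi ≤ m → m < ks.length → i < ks[m]!)) := by
  suffices H : ∀ d lo hi, hi - lo ≤ d → lo ≤ hi → hi ≤ ks.length →
      (∀ m, m < lo → ks[m]! ≤ i) →
      (∀ m, hi ≤ m → m < ks.length → i < ks[m]!) →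
      (bSearch ks i lo hi ≤ ks.length ∧
       (∀ m, m < bSearch ks i lo hi → ks[m]! ≤ i) ∧
       (∀ m, bSearch ks i lo hi ≤ m → m < ks.length → i < ks[m]!)) from
    fun lo hi => H (hi - lo) lo hi le_rfl
  intro d
  induction d with
  | zero =>
    intro lo hi hd hle hhi hlow hhigh
    have hnlt : ¬ lo < hi := by omega
    rw [bSearch, dif_neg hnlt]
    exact ⟨by omega, hlow, fun m hm hml => hhigh m (by omega) hml⟩
  | succ d ih =>
    intro lo hi hd hle hhi hlow hhigh
    by_cases hlt : lo < hi
    · rw [bSearch, dif_pos hlt]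
      have hmid1 : lo ≤ (lo + hi) / 2 := by omega
      have hmid2 : (lo + hi) / 2 < hi := by omega
      by_cases hc : ks[(lo + hi) / 2]! ≤ i
      · rw [if_pos hc]
        refine ih ((lo + hi) / 2 + 1) hi (by omega) (by omega) hhi ?_ hhigh
        intro m hm
        exact le_trans (hsort m ((lo + hi) / 2) (by omega) (by omega)) hc
      · rw [if_neg hc]
        refine ih lo ((lo + hi) / 2) (by omega) (by omega) (by omega) hlow ?_
        intro m hm hml
        exact lt_of_lt_of_le (by omega) (hsort ((lo + hi) / 2) m hm hml)
    · rw [bSearch, dif_neg hlt]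
      exact ⟨by omega, hlow, fun m hm hml => hhigh m (by omega) hml⟩

theorem getElem!_mono (ks : List Nat) (hpair : ks.Pairwise (· < ·)) :
    ∀ m m' : Nat, m ≤ m' → m' < ks.length → ks[m]! ≤ ks[m']! := by
  intro m m' hle hlt
  rcases Nat.eq_or_lt_of_le hle with h | h
  · rw [h]
  · have := (List.pairwise_iff_getElem.mp hpair) m m' (by omega) hlt h
    rw [getElem!_pos ks m (by omega), getElem!_pos ks m' hlt]
    omega

theorem filter_lt_eq_drop (ks : List Nat) (i b : Nat) (hble : b ≤ ks.length)
    (h1 : ∀ m, m < b → ks[m]! ≤ i) (h2 : ∀ m, b ≤ m → m < ks.length → i < ks[m]!) :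
    ks.filter (fun k => decide (i < k)) = ks.drop b := by
  conv_lhs => rw [← List.take_append_drop b ks]
  rw [List.filter_append]
  have ht : (ks.take b).filter (fun k => decide (i < k)) = [] := by
    apply List.filter_eq_nil_iff.mpr
    intro x hx
    obtain ⟨m, hm, rfl⟩ := List.mem_iff_getElem.mp hx
    rw [List.length_take] at hm
    have hmb : m < b := by omega
    have hmlen : m < ks.length := by omega
    have := h1 m hmb
    rw [getElem!_pos ks m hmlen] at this
    simp [List.getElem_take]
    omega
  have hd : (ks.drop b).filter (fun k => decide (i < k)) = ks.drop b := by
    apply List.filter_eq_self.mpr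
    intro x hx
    obtain ⟨m, hm, rfl⟩ := List.mem_iff_getElem.mp hx
    rw [List.length_drop] at hm
    have hmlen : b + m < ks.length := by omega
    have := h2 (b + m) (by omega) hmlen
    rw [getElem!_pos ks (b + m) hmlen] at this
    simp [List.getElem_drop]
    omega
  rw [ht, hd, List.nil_append]

theorem range'_one_filter_lt (i n : Nat) (h : i ≤ n) :
    (List.range' 1 n).filter (fun k => decide (i < k)) = List.range' (i+1) (n-i) := by
  have hsplit : List.range' 1 n = List.range' 1 i ++ List.range' (i+1) (n-i) := by
    have happ := List.range'_append (s := 1) (m := i) (n := n - i) (step := 1)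
    have h2 : (n - i) + i = n := by omega
    rw [Nat.add_comm i (n - i), h2] at happ
    rw [← happ]
    norm_num [Nat.add_comm]
  rw [hsplit, List.filter_append]
  have ht : (List.range' 1 i).filter (fun k => decide (i < k)) = [] := by
    apply List.filter_eq_nil_iff.mpr
    intro x hx
    have := List.mem_range'_1.mp hx
    simp
    omega
  have hd : (List.range' (i+1) (n-i)).filter (fun k => decide (i < k)) = List.range' (i+1) (n-i) := by
    apply List.filter_eq_self.mpr
    intro x hx
    have := List.mem_range'_1.mp hx
    simp
    omega
  rw [ht, hd, List.nil_append]

theorem bMain_eq_specLoop (arr : List Int) (num : Int) :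
    ∀ i, i ≤ arr.length →
      bMain (bIdx (bPref arr)) num
        ((List.range' i (arr.length - i)).map (fun j => (pvP arr j, j))) =
      specLoop arr num i := by
  suffices H : ∀ d i, arr.length - i = d → i ≤ arr.length →
      bMain (bIdx (bPref arr)) num
        ((List.range' i (arr.length - i)).map (fun j => (pvP arr j, j))) =
      specLoop arr num i from fun i => H _ i rfl
  intro d
  induction d with
  | zero =>
    intro i hd hle
    rw [hd, List.range'_zero, List.map_nil, specLoop, if_neg (by omega)]
    rfl
  | succ d ih =>
    intro i hd hle
    have hlt : i < arr.length := by omega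
    have hrange : List.range' i (arr.length - i) = i :: List.range' (i+1) (arr.length - (i+1)) := by
      have h2 : arr.length - i = (arr.length - (i+1)) + 1 := by omega
      rw [h2, List.range'_succ]
    rw [hrange, List.map_cons, specLoop, if_pos hlt]
    have hL := bIdx_get? arr (pvP arr i + num)
    simp only at hL
    -- the filtered candidate list
    have hfilter : (List.range' (i+1) (arr.length - i)).filter
          (fun k => pvP arr k == pvP arr i + num)
        = ((List.range' 1 arr.length).filter (fun k => pvP arr k == pvP arr i + num)).filter
            (fun k => decide (i < k)) := by
      rw [List.filter_comm, range'_one_filter_lt i arr.length hle]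
    rw [find?_eq_head?_filter, hfilter]
    set l := (List.range' 1 arr.length).filter (fun k => pvP arr k == pvP arr i + num) with hldef
    by_cases hnil : l = []
    · have hget : (bIdx (bPref arr)).get? (pvP arr i + num) = none := by
        rw [hL, hnil]; rfl
      rw [bMain, hget]
      rw [hnil, List.filter_nil, List.head?_nil]
      exact ih (i+1) (by omega) (by omega)
    · have hget : (bIdx (bPref arr)).get? (pvP arr i + num) = some l := by
        rw [hL, if_neg (by simpa [List.isEmpty_iff] using hnil)]
      rw [bMain, hget]
      dsimp only
      have hpair : l.Pairwise (· < ·) := List.Pairwise.filter _ (List.pairwise_lt_range' ..)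
      have hsort := getElem!_mono l hpair
      obtain ⟨hb, h1, h2⟩ := bSearch_spec l i hsort 0 l.length (Nat.zero_le _) le_rfl
        (by omega) (by omega)
      have hdrop : l.filter (fun k => decide (i < k)) = l.drop (bSearch l i 0 l.length) :=
        filter_lt_eq_drop l i _ hb h1 h2
      rw [hdrop, List.head?_drop]
      by_cases hblen : bSearch l i 0 l.length < l.length
      · rw [dif_pos hblen, List.getElem?_eq_getElem hblen]
        rw [getElem!_pos l _ hblen]
      · rw [dif_neg hblen, List.getElem?_eq_none (by omega)]
        exact ih (i+1) (by omega) (by omega)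

theorem alt_eq_specLoop (arr : List Int) (num : Int) :
    solution_alt arr num = specLoop arr num 0 := by
  show bMain (bIdx (bPref arr)) num (bPref arr).dropLast.zipIdx = specLoop arr num 0
  have hdrop : (bPref arr).dropLast = (List.range arr.length).map (pvP arr) := by
    rw [bPref_eq, List.range_succ, List.map_append, List.map_singleton, List.dropLast_concat]
  rw [hdrop, zipIdx_map_range]
  have h0 : List.range arr.length = List.range' 0 arr.length := List.range_eq_range' ..
  rw [h0]
  have := bMain_eq_specLoop arr num 0 (Nat.zero_le _)
  simpa using this

-- ===== VERDICT (by name: the statement is the Claim_ definition above) =====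
theorem solution_spec : Claim_equal_solution := by
  intro arr num _
  show solution arr num = solution_alt arr num
  rw [alt_eq_specLoop, solution, aOuter_eq_specLoop]
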